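-- pv_equiv track=rewrite | github.com/Koceila06/Chaine-de-markov | projet.py | nb_indiv_s_i_r
-- ===== SOURCE A (Python) =====
-- def nb_indiv_s_i_r(matrice,t): #Q2.1.1
--     s=list()#liste sain
--     il=list()#liste infecté
--     r=list()#liste guéris
--     t_liste=list()#liste temps
--     #pour chaque jours
--     for j in range(t):
--         s_t=0
--         r_t=0
--         i_t=0
--         t_liste.append(j)
--         #pour chaque individu
--         for i in range(len(matrice)):
--
--             if matrice[i][j]==0 :
--                 s_t+=1
--             if matrice[i][j]==1:
--                 i_t+=1
--             if matrice[i][j]==2 :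
--                 r_t+=1
--         s.append(s_t)
--         il.append(i_t)
--         r.append(r_t)
--     return t_liste,s,il,r
-- ===== SOURCE B (Python) =====
-- def nb_indiv_s_i_r(matrice, t):
--     # One row-major pass builds a dict tally keyed by (day, state);
--     # the three per-day lists are then read from the dict.
--     cnt = {}
--     for row in matrice:
--         for j in range(t):
--             key = (j, row[j])
--             cnt[key] = cnt.get(key, 0) + 1
--     t_liste = list(range(t))
--     s = [cnt.get((j, 0), 0) for j in t_liste]
--     il = [cnt.get((j, 1), 0) for j in t_liste]
--     r = [cnt.get((j, 2), 0) for j in t_liste]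
--     return t_liste, s, il, r
-- ===== Notes on version B (the rewrite author's own statement) =====
-- stated objective: alternative
-- what changed: Instead of A's day-major nested loops with three per-day scalar if-counters, B makes one row-major pass that accumulates a dict counter keyed by (day, state) and then reads the three per-day lists from that dict.
import Mathlib
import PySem

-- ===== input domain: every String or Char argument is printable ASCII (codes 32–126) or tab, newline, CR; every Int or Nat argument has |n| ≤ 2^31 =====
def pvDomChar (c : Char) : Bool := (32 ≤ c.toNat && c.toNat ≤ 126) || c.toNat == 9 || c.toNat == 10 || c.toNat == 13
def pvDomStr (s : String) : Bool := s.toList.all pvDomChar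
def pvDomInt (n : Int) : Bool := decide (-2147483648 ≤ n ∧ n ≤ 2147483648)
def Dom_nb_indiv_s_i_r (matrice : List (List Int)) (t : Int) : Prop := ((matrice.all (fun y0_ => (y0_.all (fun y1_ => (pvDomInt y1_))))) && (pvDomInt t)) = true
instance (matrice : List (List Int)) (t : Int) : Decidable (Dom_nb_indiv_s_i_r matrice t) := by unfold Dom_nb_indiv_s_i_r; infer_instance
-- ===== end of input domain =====

-- B replaces A's day-major nested loops with three per-day scalar counters by one
-- row-major pass accumulating a dict counter keyed by (day, state), read out at the
-- end (objective: alternative).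

-- ===== PORT A =====
-- inner loop of A: for i in range(len(matrice)): three independent 'if' counters.
-- matrice[i][j] is ported as pyGetD; Pre_ guarantees both indices are in range,
-- so the defaults are never reached on admitted inputs.
def pvInnerA (matrice : List (List Int)) (j : Int) : Int × Int × Int :=
  -- s_t / i_t / r_t are the three components of the accumulator c, in that order
  (PySem.List.pyRange 0 (matrice.length : Int) 1).foldl
    (fun (c : Int × Int × Int) i =>
      (if PySem.List.pyGetD (PySem.List.pyGetD matrice i []) j 0 = 0 then c.1 + 1 else c.1,
       if PySem.List.pyGetD (PySem.List.pyGetD matrice i []) j 0 = 1 then c.2.1 + 1 else c.2.1,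
       if PySem.List.pyGetD (PySem.List.pyGetD matrice i []) j 0 = 2 then c.2.2 + 1 else c.2.2))
    (0, 0, 0)

-- outer loop body of A: append j to t_liste, run the inner counters, append them.
-- state is (s, il, r, t_liste).
def pvBodyA (matrice : List (List Int))
    (st : List Int × List Int × List Int × List Int) (j : Int) :
    List Int × List Int × List Int × List Int :=
  let tl := st.2.2.2 ++ [j]
  let c := pvInnerA matrice j
  (st.1 ++ [c.1], st.2.1 ++ [c.2.1], st.2.2.1 ++ [c.2.2], tl)

def nb_indiv_s_i_r (matrice : List (List Int)) (t : Int) :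
    List Int × List Int × List Int × List Int :=
  let res := (PySem.List.pyRange 0 t 1).foldl (pvBodyA matrice) ([], [], [], [])
  (res.2.2.2, res.1, res.2.1, res.2.2.1)

-- ===== PORT B =====
-- Source B: one pass over rows filling a dict 'cnt' keyed by (j, row[j])
-- ('cnt[key] = cnt.get(key, 0) + 1' is Dict.modify key 0 (· + 1)),
-- then t_liste = list(range(t)) and three lookup comprehensions.
def nb_indiv_s_i_r_alt (matrice : List (List Int)) (t : Int) :
    List Int × List Int × List Int × List Int :=
  let cnt : PySem.Dict (Int × Int) Int :=
    matrice.foldl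
      (fun d row =>
        (PySem.List.pyRange 0 t 1).foldl
          (fun d j => d.modify (j, PySem.List.pyGetD row j 0) 0 (· + 1)) d)
      PySem.Dict.empty
  let t_liste := PySem.List.pyRange 0 t 1
  (t_liste,
   t_liste.map (fun j => cnt.getD (j, 0) 0),
   t_liste.map (fun j => cnt.getD (j, 1) 0),
   t_liste.map (fun j => cnt.getD (j, 2) 0))

-- ===== PRECONDITION & SPEC =====
-- Pre_ excludes exactly the inputs on which Python A raises IndexError:
-- a row shorter than some day index j < t (possible only when t > 0).
def Pre_nb_indiv_s_i_r (matrice : List (List Int)) (t : Int) : Prop :=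
  ∀ row ∈ matrice, t ≤ (row.length : Int)
instance (matrice : List (List Int)) (t : Int) : Decidable (Pre_nb_indiv_s_i_r matrice t) := by
  unfold Pre_nb_indiv_s_i_r; infer_instance

def pvWitness_nb_indiv_s_i_r : List (List Int) × Int := ([[0, 1], [2, 0]], 2)

def Spec_nb_indiv_s_i_r (matrice : List (List Int)) (t : Int) (out : List Int × List Int × List Int × List Int) : Prop := out = nb_indiv_s_i_r_alt matrice t
instance (matrice : List (List Int)) (t : Int) (out : List Int × List Int × List Int × List Int) : Decidable (Spec_nb_indiv_s_i_r matrice t out) := by unfold Spec_nb_indiv_s_i_r; infer_instance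

-- ===== CLAIM (what is proved, stated in full; the proofs are below) =====
def Claim_equal_nb_indiv_s_i_r : Prop := ∀ (matrice : List (List Int)) (t : Int), Dom_nb_indiv_s_i_r matrice t → Pre_nb_indiv_s_i_r matrice t → Spec_nb_indiv_s_i_r matrice t (nb_indiv_s_i_r matrice t)

-- ===== LEMMAS AND PROOFS =====

-- the column for day j
def pvCol (matrice : List (List Int)) (j : Int) : List Int :=
  matrice.map (fun row => PySem.List.pyGetD row j 0)

-- the (day, state) keys one row contributes to the dict
def pvKeys (t : Int) (row : List Int) : List (Int × Int) :=
  (PySem.List.pyRange 0 t 1).map (fun j => (j, PySem.List.pyGetD row j 0))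

-- a three-counter pass over a list is three counts
lemma pvCountFold (l : List Int) (a b c : Int) :
    l.foldl
      (fun (c : Int × Int × Int) x =>
        (if x = 0 then c.1 + 1 else c.1,
         if x = 1 then c.2.1 + 1 else c.2.1,
         if x = 2 then c.2.2 + 1 else c.2.2))
      (a, b, c)
    = (a + (l.count 0 : Int), b + (l.count 1 : Int), c + (l.count 2 : Int)) := by
  induction l generalizing a b c with
  | nil => simp
  | cons x xs ih =>
    simp only [List.foldl_cons, ih, List.count_cons]
    split_ifs <;> simp_all <;> ring

-- A's inner loop computes the three counts of day j's column
lemma pvInnerA_eq (matrice : List (List Int)) (j : Int) :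
    pvInnerA matrice j
    = (((pvCol matrice j).count 0 : Int),
       ((pvCol matrice j).count 1 : Int),
       ((pvCol matrice j).count 2 : Int)) := by
  unfold pvInnerA
  rw [PySem.List.foldl_pyRange_zero_pyGetD' matrice ([] : List Int)
      (fun (c : Int × Int × Int) row =>
        (if PySem.List.pyGetD row j 0 = 0 then c.1 + 1 else c.1,
         if PySem.List.pyGetD row j 0 = 1 then c.2.1 + 1 else c.2.1,
         if PySem.List.pyGetD row j 0 = 2 then c.2.2 + 1 else c.2.2)) (0, 0, 0)]
  have := pvCountFold (pvCol matrice j) 0 0 0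
  simpa [pvCol, List.foldl_map] using this

-- A's outer fold, with arbitrary accumulated lists
lemma pvOuterA (matrice : List (List Int)) (L : List Int)
    (s il r tl : List Int) :
    L.foldl (pvBodyA matrice) (s, il, r, tl)
    = (s ++ L.map (fun j => (pvInnerA matrice j).1),
       il ++ L.map (fun j => (pvInnerA matrice j).2.1),
       r ++ L.map (fun j => (pvInnerA matrice j).2.2),
       tl ++ L) := by
  induction L generalizing s il r tl with
  | nil => simp
  | cons j L ih =>
    simp only [List.foldl_cons, List.map_cons]
    rw [pvBodyA, ih]
    simp

-- B's nested fold: the dict's value at p is the count of p among all rows' keys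
lemma pvCntD (matrice : List (List Int)) (t : Int) (d : PySem.Dict (Int × Int) Int)
    (p : Int × Int) :
    (matrice.foldl
      (fun d row =>
        (PySem.List.pyRange 0 t 1).foldl
          (fun d j => d.modify (j, PySem.List.pyGetD row j 0) 0 (· + 1)) d) d).getD p 0
    = d.getD p 0 + ((matrice.map (pvKeys t)).flatten.count p : Int) := by
  induction matrice generalizing d with
  | nil => simp
  | cons row rest ih =>
    simp only [List.foldl_cons, List.map_cons, List.flatten_cons, List.count_append, ih]
    have : (PySem.List.pyRange 0 t 1).foldl
        (fun d j => d.modify (j, PySem.List.pyGetD row j 0) 0 (· + 1)) d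
        = (pvKeys t row).foldl (fun d x => d.modify x 0 (· + 1)) d := by
      simp [pvKeys, List.foldl_map]
    rw [this, PySem.Dict.getD_foldl_modify_add_one]
    push_cast
    ring

-- counting (j, v) among one row's keys: exactly one hit when j is a valid day
lemma pvRowCount (L : List Int) (hnd : L.Nodup) (j v : Int) (hj : j ∈ L)
    (g : Int → Int) :
    (L.map (fun j' => (j', g j'))).count (j, v) = if g j = v then 1 else 0 := by
  induction L with
  | nil => cases hj
  | cons a L ih =>
    rcases List.nodup_cons.mp hnd with ⟨ha, hnd'⟩
    rcases List.mem_cons.mp hj with h | h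
    · subst h
      have h0 : (L.map (fun j' => (j', g j'))).count (j, v) = 0 := by
        rw [List.count_eq_zero]
        intro hmem
        rcases List.mem_map.mp hmem with ⟨x, hx, hxe⟩
        exact ha (by cases hxe; exact hx)
      simp [List.count_cons, h0, Prod.ext_iff]
    · have hja : (j : Int) ≠ a := fun he => ha (he ▸ h)
      simp only [List.map_cons, List.count_cons, ih hnd' h]
      have : ¬ ((a, g a) = (j, v)) := by
        intro he; exact hja (by cases he; rfl)
      simp [this]

-- counting (j, v) over all rows' keys is counting v in column j
lemma pvFlatCount (matrice : List (List Int)) (t j v : Int)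
    (hj : j ∈ PySem.List.pyRange 0 t 1) :
    ((matrice.map (pvKeys t)).flatten.count (j, v)) = (pvCol matrice j).count v := by
  induction matrice with
  | nil => simp [pvCol]
  | cons row rest ih =>
    simp only [List.map_cons, List.flatten_cons, List.count_append, ih, pvCol, List.count_cons]
    have := pvRowCount (PySem.List.pyRange 0 t 1)
      (PySem.List.nodup_pyRange_one 0 t) j v hj
      (fun j' => PySem.List.pyGetD row j' 0)
    rw [pvKeys, this]
    by_cases h : PySem.List.pyGetD row j 0 = v <;> simp [h] <;> omega

theorem nb_indiv_s_i_r_spec : Claim_equal_nb_indiv_s_i_r := by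
  intro matrice t _ _
  unfold Spec_nb_indiv_s_i_r nb_indiv_s_i_r nb_indiv_s_i_r_alt
  rw [pvOuterA]
  simp only [List.nil_append]
  refine Prod.ext rfl (Prod.ext ?_ (Prod.ext ?_ ?_)) <;>
    · apply List.map_congr_left
      intro j hj
      rw [pvInnerA_eq, pvCntD, pvFlatCount matrice t j _ hj]
      simp
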